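-- pv_equiv track=rewrite | github.com/mskozlova/advent_of_code | 2023/day3/day3_pt2.py | get_number_coords
-- ===== SOURCE A (Python) =====
-- def get_number_coords(line, line_num):
--     numbers = []
--     current_number_start = None
--
--     for i, sym in enumerate(line):
--         if sym.isdigit():
--             if current_number_start is None:
--                 current_number_start = i
--
--         elif current_number_start is not None:
--             numbers.append(
--                 {
--                     "row": line_num,
--                     "col": current_number_start,
--                     "length": i - current_number_start,
--                     "number": int(line[current_number_start:i]),
--                 }
--             )
--             current_number_start = None
--
--     if current_number_start is not None:
--         numbers.append(
--             {
--                 "row": line_num,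
--                 "col": current_number_start,
--                 "length": len(line) - current_number_start,
--                 "number": int(line[current_number_start:]),
--             }
--         )
--
--     return numbers
-- ===== SOURCE B (Python) =====
-- def get_number_coords(line, line_num):
--     # Run-skipping two-pointer scan: on a digit, advance a second pointer to the
--     # end of the maximal digit run and emit it at once; no pending-start flag.
--     numbers = []
--     n = len(line)
--     i = 0
--     while i < n:
--         if line[i].isdigit():
--             j = i
--             while j < n and line[j].isdigit():
--                 j += 1
--             numbers.append(
--                 {
--                     "row": line_num,
--                     "col": i,
--                     "length": j - i,
--                     "number": int(line[i:j]),
--                 }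
--             )
--             i = j
--         else:
--             i += 1
--     return numbers
-- ===== Notes on version B (the rewrite author's own statement) =====
-- stated objective: alternative
-- what changed: Replaces A's pending-start flag state machine (set start on first digit, flush on non-digit and at end-of-line) with a two-pointer scan that, upon seeing a digit, walks a second pointer to the end of the maximal digit run and emits the record immediately, so there is no carried Optional state and no end-of-loop flush.
import Mathlib
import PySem

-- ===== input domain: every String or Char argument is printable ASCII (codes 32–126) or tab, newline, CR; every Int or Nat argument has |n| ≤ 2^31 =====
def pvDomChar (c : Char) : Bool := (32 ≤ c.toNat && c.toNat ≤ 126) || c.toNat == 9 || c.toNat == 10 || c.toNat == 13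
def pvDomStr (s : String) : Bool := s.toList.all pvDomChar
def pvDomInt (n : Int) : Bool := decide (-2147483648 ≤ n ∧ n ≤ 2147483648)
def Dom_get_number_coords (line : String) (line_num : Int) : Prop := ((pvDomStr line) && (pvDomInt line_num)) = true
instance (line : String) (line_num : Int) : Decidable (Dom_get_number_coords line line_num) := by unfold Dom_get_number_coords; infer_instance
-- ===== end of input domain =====

-- B replaces A's pending-start flag state machine by a two-pointer run-skipping scan; same O(n) cost, no carried Optional state.

-- ===== PORT A =====
-- the dict literal both Pythons build (insertion order preserved)
def pvEntry (row col len num : Int) : List (String × Int) :=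
  [("row", row), ("col", col), ("length", len), ("number", num)]

-- int(...) is ported as (PySem.Int.ofChars? …).getD 0; the slice is a nonempty run of
-- chars with isdigit = true, which on the ASCII domain are '0'-'9', so ofChars? is
-- always `some` there and the default is never used.
def aStep (cs : List Char) (line_num : Int)
    (st : List (List (String × Int)) × Option Int) (p : Int × Char) :
    List (List (String × Int)) × Option Int :=
  if PySem.Chars.isdigit p.2 then
    (st.1, match st.2 with
           | none => some p.1
           | some s => some s)
  else
    match st.2 with
    | some s =>
        (st.1 ++ [pvEntry line_num s (p.1 - s)
          ((PySem.Int.ofChars? (PySem.List.slice cs (some s) (some p.1))).getD 0)], none)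
    | none => (st.1, none)

def get_number_coords (line : String) (line_num : Int) : List (List (String × Int)) :=
  let cs := line.toList
  let r := (PySem.List.enumerate cs 0).foldl (aStep cs line_num) ([], none)
  match r.2 with
  | some s =>
      r.1 ++ [pvEntry line_num s ((cs.length : Int) - s)
        ((PySem.Int.ofChars? (PySem.List.slice cs (some s) none)).getD 0)]
  | none => r.1

-- ===== PORT B =====
-- Source B's outer while loop: recursion over the remaining characters, carrying the
-- current column; the inner `while j < n and line[j].isdigit()` run-advance is
-- takeWhile/dropWhile of the maximal digit run (int(line[i:j]) as for A).
def bLoop (line_num : Int) (col : Nat) : List Char → List (List (String × Int))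
  | [] => []
  | c :: rest =>
    if h : PySem.Chars.isdigit c then
      let run := (c :: rest).takeWhile PySem.Chars.isdigit
      pvEntry line_num (col : Int) (run.length : Int)
          ((PySem.Int.ofChars? run).getD 0)
        :: bLoop line_num (col + run.length) ((c :: rest).dropWhile PySem.Chars.isdigit)
    else
      bLoop line_num (col + 1) rest
termination_by cs => cs.length
decreasing_by
  · simp [h]
    exact List.length_dropWhile_le _ _
  · simp

def get_number_coords_alt (line : String) (line_num : Int) : List (List (String × Int)) :=
  bLoop line_num 0 line.toList

-- ===== PRECONDITION & SPEC =====
def Spec_get_number_coords (line : String) (line_num : Int) (out : List (List (String × Int))) : Prop := out = get_number_coords_alt line line_num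
instance (line : String) (line_num : Int) (out : List (List (String × Int))) : Decidable (Spec_get_number_coords line line_num out) := by unfold Spec_get_number_coords; infer_instance

-- ===== CLAIM (what is proved, stated in full; the proofs are below) =====
def Claim_equal_get_number_coords : Prop := ∀ (line : String) (line_num : Int), Dom_get_number_coords line line_num → Spec_get_number_coords line line_num (get_number_coords line line_num)

-- ===== LEMMAS AND PROOFS =====

-- the post-loop flush of A, as a function of the fold's final state
def aFinish (cs : List Char) (line_num : Int)
    (r : List (List (String × Int)) × Option Int) : List (List (String × Int)) :=
  match r.2 with
  | some s =>
      r.1 ++ [pvEntry line_num s ((cs.length : Int) - s)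
        ((PySem.Int.ofChars? (PySem.List.slice cs (some s) none)).getD 0)]
  | none => r.1

theorem takeWhile_all_append {α : Type} (p : α → Bool) (l t : List α)
    (h : ∀ x ∈ l, p x = true) :
    (l ++ t).takeWhile p = l ++ t.takeWhile p := by
  induction l with
  | nil => simp
  | cons a l ih =>
      simp only [List.cons_append, List.takeWhile_cons, h a (by simp)]
      simp [ih (fun x hx => h x (by simp [hx]))]

theorem dropWhile_all_append {α : Type} (p : α → Bool) (l t : List α)
    (h : ∀ x ∈ l, p x = true) :
    (l ++ t).dropWhile p = t.dropWhile p := by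
  induction l with
  | nil => simp
  | cons a l ih =>
      simp only [List.cons_append, List.dropWhile_cons, h a (by simp)]
      exact ih (fun x hx => h x (by simp [hx]))

theorem bLoop_nil (ln : Int) (col : Nat) : bLoop ln col [] = [] := by
  rw [bLoop.eq_def]

theorem bLoop_cons_digit (ln : Int) (col : Nat) (c : Char) (rest : List Char)
    (h : PySem.Chars.isdigit c = true) :
    bLoop ln col (c :: rest) =
      pvEntry ln (col : Int) (((c :: rest).takeWhile PySem.Chars.isdigit).length : Int)
          ((PySem.Int.ofChars? ((c :: rest).takeWhile PySem.Chars.isdigit)).getD 0)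
        :: bLoop ln (col + ((c :: rest).takeWhile PySem.Chars.isdigit).length)
            ((c :: rest).dropWhile PySem.Chars.isdigit) := by
  rw [bLoop.eq_def]
  simp [h]

theorem bLoop_cons_nondigit (ln : Int) (col : Nat) (c : Char) (rest : List Char)
    (h : PySem.Chars.isdigit c = false) :
    bLoop ln col (c :: rest) = bLoop ln (col + 1) rest := by
  rw [bLoop.eq_def]
  simp [h]

-- the two-state loop invariant: N-part (no pending run) and S-part (pending digit run `pend`)
theorem loop_invariant (cs : List Char) (ln : Int) (t : List Char) :
    (∀ (i : Nat) (acc : List (List (String × Int))),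
        cs.drop i = t →
        aFinish cs ln ((PySem.List.enumerate t (i : Int)).foldl (aStep cs ln) (acc, none))
          = acc ++ bLoop ln i t)
    ∧ (∀ (pend : List Char) (i : Nat) (acc : List (List (String × Int))),
        pend ≠ [] → (∀ x ∈ pend, PySem.Chars.isdigit x = true) →
        pend.length ≤ i → cs.drop (i - pend.length) = pend ++ t →
        aFinish cs ln ((PySem.List.enumerate t (i : Int)).foldl (aStep cs ln)
            (acc, some ((i - pend.length : Nat) : Int)))
          = acc ++ bLoop ln (i - pend.length) (pend ++ t)) := by
  induction t with
  | nil =>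
      constructor
      · intro i acc _
        simp [PySem.List.enumerate_nil, aFinish, bLoop_nil]
      · intro pend i acc hne hdig hle hdrop
        rw [List.append_nil] at hdrop
        have hdigpend : pend.takeWhile PySem.Chars.isdigit = pend :=
          List.takeWhile_eq_self_iff.mpr hdig
        have hdroppend : pend.dropWhile PySem.Chars.isdigit = [] :=
          List.dropWhile_eq_nil_iff.mpr hdig
        have hlen : cs.length - (i - pend.length) = pend.length := by
          have := congrArg List.length hdrop
          simpa [List.length_drop] using this
        have hslice : PySem.List.slice cs (some ((i - pend.length : Nat) : Int)) none
            = pend := by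
          rw [PySem.List.slice_from_natCast]
          exact hdrop
        have hlenle : i - pend.length ≤ cs.length := by
          by_cases h : i - pend.length ≤ cs.length
          · exact h
          · exfalso
            have h0 : cs.drop (i - pend.length) = [] :=
              List.drop_eq_nil_of_le (Nat.le_of_lt (Nat.lt_of_not_le h))
            rw [hdrop] at h0
            exact hne h0
        obtain ⟨c, pend', rfl⟩ := List.exists_cons_of_ne_nil hne
        have hdc : PySem.Chars.isdigit c = true := hdig c (by simp)
        have hlenint : ((cs.length : Nat) : Int) - ((i - (c :: pend').length : Nat) : Int)
            = (((c :: pend').length : Nat) : Int) := by omega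
        simp only [PySem.List.enumerate_nil, List.foldl_nil, aFinish, List.append_nil]
        rw [bLoop_cons_digit _ _ _ _ hdc, hdigpend, hdroppend, bLoop_nil, hslice, hlenint]
  | cons c t ih =>
      constructor
      · intro i acc hdrop
        rw [PySem.List.enumerate_cons, List.foldl_cons]
        by_cases hdc : PySem.Chars.isdigit c = true
        · have := ih.2 [c] (i + 1) acc (by simp) (by simpa using hdc)
            (by simp) (by simpa using hdrop)
          simp only [List.singleton_append] at this
          push_cast at this
          simpa [aStep, hdc] using this
        · have hfalse : PySem.Chars.isdigit c = false := by simpa using hdc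
          have := ih.1 (i + 1) acc (by
            have h2 : cs.drop (i + 1) = (cs.drop i).drop 1 := by
              rw [List.drop_drop]
            simp [h2, hdrop])
          rw [bLoop_cons_nondigit _ _ _ _ hfalse]
          push_cast at this
          simpa [aStep, hfalse] using this
      · intro pend i acc hne hdig hle hdrop
        rw [PySem.List.enumerate_cons, List.foldl_cons]
        by_cases hdc : PySem.Chars.isdigit c = true
        · -- extend the pending run with c
          have hdig' : ∀ x ∈ pend ++ [c], PySem.Chars.isdigit x = true := by
            intro x hx
            rcases List.mem_append.mp hx with h | h
            · exact hdig x h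
            · simp at h; subst h; exact hdc
          have heq : i + 1 - (pend ++ [c]).length = i - pend.length := by
            simp only [List.length_append, List.length_cons, List.length_nil]
            omega
          have := ih.2 (pend ++ [c]) (i + 1) acc (by simp) hdig'
            (by simp only [List.length_append, List.length_cons, List.length_nil]; omega)
            (by rw [heq, hdrop]; simp)
          rw [heq] at this
          simp only [List.append_assoc, List.singleton_append] at this
          push_cast at this
          simpa [aStep, hdc] using this
        · -- flush the pending run
          have hfalse : PySem.Chars.isdigit c = false := by simpa using hdc
          have hslice : PySem.List.slice cs (some ((i - pend.length : Nat) : Int))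
              (some (i : Int)) = pend := by
            rw [PySem.List.slice_natCast, hdrop]
            have h3 : i - (i - pend.length) = pend.length := by omega
            rw [h3]
            simp
          have hrest : cs.drop (i + 1) = t := by
            have h1 : cs.drop i = c :: t := by
              have h2 : cs.drop i = (cs.drop (i - pend.length)).drop pend.length := by
                rw [List.drop_drop]
                congr 1
                omega
              rw [h2, hdrop, List.drop_left' rfl]
            have h2 : cs.drop (i + 1) = (cs.drop i).drop 1 := by
              rw [List.drop_drop]
            simp [h2, h1]
          have hlenint : (i : Int) - ((i - pend.length : Nat) : Int)
              = ((pend.length : Nat) : Int) := by omega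
          have := ih.1 (i + 1) (acc ++ [pvEntry ln ((i - pend.length : Nat) : Int)
              ((i : Int) - ((i - pend.length : Nat) : Int))
              ((PySem.Int.ofChars? pend).getD 0)]) hrest
          obtain ⟨d0, pend', rfl⟩ := List.exists_cons_of_ne_nil hne
          have hbd : PySem.Chars.isdigit d0 = true := hdig d0 (by simp)
          rw [show (d0 :: pend') ++ c :: t = d0 :: (pend' ++ c :: t) from by simp,
            bLoop_cons_digit _ _ _ _ hbd,
            show d0 :: (pend' ++ c :: t) = (d0 :: pend') ++ (c :: t) from by simp,
            takeWhile_all_append _ _ _ hdig, dropWhile_all_append _ _ _ hdig]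
          simp only [List.takeWhile_cons, List.dropWhile_cons, hfalse, Bool.false_eq_true,
            if_false, List.append_nil]
          rw [show i - (d0 :: pend').length + (d0 :: pend').length = i from by omega,
            bLoop_cons_nondigit _ _ _ _ hfalse]
          rw [hlenint] at this
          push_cast at this
          simp only [aStep, hfalse, Bool.false_eq_true, if_false]
          rw [hslice]
          have hfix : (i : Int) - ((i - (pend'.length + 1) : Nat) : Int)
              = (pend'.length : Int) + 1 := by
            simp only [List.length_cons] at hle
            omega
          simpa [hfix] using this

-- ===== VERDICT (by name: the statement is the Claim_ definition above) =====
theorem get_number_coords_spec : Claim_equal_get_number_coords := by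
  intro line line_num _
  show get_number_coords line line_num = get_number_coords_alt line line_num
  unfold get_number_coords get_number_coords_alt
  have := (loop_invariant line.toList line_num line.toList).1 0 [] (by simp)
  simpa [aFinish] using this
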